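-- pv_equiv track=rewrite | github.com/ssiens-oss/ssiens-oss-static_pod | mashdeck/vocals/sing/generator.py | _wave_melody
-- ===== SOURCE A (Python) =====
-- from typing import List, Dict, Tuple
--
-- def _wave_melody(scale: List[int], length: int) -> List[int]:
--     """Generate wave-like melody"""
--     melody = []
--     direction = 1
--     pos = 0
--
--     for _ in range(length):
--         octave = (pos // len(scale)) * 12
--         melody.append(scale[pos % len(scale)] + octave)
--
--         pos += direction
--
--         # Change direction at extremes
--         if pos >= len(scale) * 2:
--             direction = -1
--         elif pos < 0:
--             direction = 1
--
--     return melody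
-- ===== SOURCE B (Python) =====
-- from typing import List
--
-- def _wave_melody(scale: List[int], length: int) -> List[int]:
--     """Generate wave-like melody (closed-form triangular wave, no state machine)."""
--     n = len(scale)
--     out = []
--     for i in range(length):
--         r = i % (4 * n + 2)
--         pos = r if r <= 2 * n else 4 * n - r
--         out.append(scale[pos % n] + (pos // n) * 12)
--     return out
-- ===== Notes on version B (the rewrite author's own statement) =====
-- stated objective: alternative
-- what changed: Replaces the direction/pos bouncing state machine by a closed-form triangular-wave position computed per step from i mod (4*len(scale)+2), so the loop body is stateless modular arithmetic instead of carrying and flipping a direction.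
import Mathlib
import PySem

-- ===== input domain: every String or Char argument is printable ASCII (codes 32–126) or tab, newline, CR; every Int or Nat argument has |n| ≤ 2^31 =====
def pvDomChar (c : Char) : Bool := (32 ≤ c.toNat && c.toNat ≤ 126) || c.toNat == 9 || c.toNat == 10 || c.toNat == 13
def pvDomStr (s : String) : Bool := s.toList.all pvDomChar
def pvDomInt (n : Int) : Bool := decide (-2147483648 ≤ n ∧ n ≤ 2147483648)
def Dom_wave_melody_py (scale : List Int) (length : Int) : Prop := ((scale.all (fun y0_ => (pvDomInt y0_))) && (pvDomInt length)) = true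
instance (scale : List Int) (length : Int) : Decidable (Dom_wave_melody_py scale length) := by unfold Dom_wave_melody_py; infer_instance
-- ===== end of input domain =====

-- B replaces A's direction/pos state machine by a closed-form triangular-wave position from i mod (4n+2); same O(length) cost, stateless loop body.

-- ===== PORT A =====
-- one iteration of A's loop; the indexing uses pyGet?+getD 0: on Pre_ the index pos % len(scale) is always in range, so the default is never taken
def waveStepA (scale : List Int) (st : List Int × Int × Int) (_i : Int) : List Int × Int × Int :=
  match st with
  | (melody, direction, pos) =>
    let octave := (PySem.Int.floordiv pos (scale.length : Int)) * 12
    let melody' := melody ++ [(PySem.List.pyGet? scale (PySem.Int.mod pos (scale.length : Int))).getD 0 + octave]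
    let pos' := pos + direction
    if pos' ≥ (scale.length : Int) * 2 then (melody', -1, pos')
    else if pos' < 0 then (melody', 1, pos')
    else (melody', direction, pos')

def wave_melody_py (scale : List Int) (length : Int) : List Int :=
  ((PySem.List.pyRange 0 length 1).foldl (waveStepA scale) ([], 1, 0)).1

-- ===== PORT B =====
-- B's per-step note: closed-form triangular position (indexing exact on Pre_, as above)
def waveNoteB (scale : List Int) (i : Int) : Int :=
  let n : Int := scale.length
  let r := PySem.Int.mod i (4 * n + 2)
  let pos := if r ≤ 2 * n then r else 4 * n - r
  (PySem.List.pyGet? scale (PySem.Int.mod pos n)).getD 0 + (PySem.Int.floordiv pos n) * 12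

def wave_melody_py_alt (scale : List Int) (length : Int) : List Int :=
  (PySem.List.pyRange 0 length 1).map (waveNoteB scale)

-- ===== PRECONDITION & SPEC =====
-- Pre_ excludes scale = [] with length > 0, where the Python A (and B) raise ZeroDivisionError on pos % len(scale)
def Pre_wave_melody_py (scale : List Int) (length : Int) : Prop := scale ≠ [] ∨ length ≤ 0
instance (scale : List Int) (length : Int) : Decidable (Pre_wave_melody_py scale length) := by unfold Pre_wave_melody_py; infer_instance
def pvWitness_wave_melody_py : List Int × Int := ([60, 62, 64], 10)

def Spec_wave_melody_py (scale : List Int) (length : Int) (out : List Int) : Prop := out = wave_melody_py_alt scale length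
instance (scale : List Int) (length : Int) (out : List Int) : Decidable (Spec_wave_melody_py scale length out) := by unfold Spec_wave_melody_py; infer_instance

-- ===== CLAIM (what is proved, stated in full; the proofs are below) =====
def Claim_equal_wave_melody_py : Prop := ∀ (scale : List Int) (length : Int), Dom_wave_melody_py scale length → Pre_wave_melody_py scale length → Spec_wave_melody_py scale length (wave_melody_py scale length)

-- ===== LEMMAS AND PROOFS =====

-- triangular-wave position and direction of A's state machine at step i (proof-only helpers)
def posF (n i : Int) : Int :=
  if PySem.Int.mod i (4 * n + 2) ≤ 2 * n then PySem.Int.mod i (4 * n + 2)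
  else 4 * n - PySem.Int.mod i (4 * n + 2)

def dirF (n i : Int) : Int :=
  if 2 * n ≤ PySem.Int.mod i (4 * n + 2) ∧ PySem.Int.mod i (4 * n + 2) ≤ 4 * n then -1 else 1

lemma mod_pos_eq_emod (i n : Int) (hn : 1 ≤ n) :
    PySem.Int.mod i (4 * n + 2) = i % (4 * n + 2) :=
  PySem.Int.mod_eq_emod_of_pos (by omega)

lemma emod_succ (i n : Int) (hn : 1 ≤ n) :
    (i + 1) % (4 * n + 2) =
      (if i % (4 * n + 2) = 4 * n + 1 then 0 else i % (4 * n + 2) + 1) := by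
  have hP : (0:Int) < 4 * n + 2 := by omega
  have h0 : 0 ≤ i % (4 * n + 2) := Int.emod_nonneg _ (by omega)
  have h1 : i % (4 * n + 2) < 4 * n + 2 := Int.emod_lt_of_pos _ hP
  have h1P : (1:Int) % (4 * n + 2) = 1 := Int.emod_eq_of_lt (by omega) (by omega)
  rw [Int.add_emod, h1P]
  split_ifs with h
  · rw [h, show (4 * n + 1 + 1 : Int) = 4 * n + 2 by ring, Int.emod_self]
  · exact Int.emod_eq_of_lt (by omega) (by omega)

-- one step of A from the closed-form state lands in the next closed-form state
lemma step_state (n i : Int) (hn : 1 ≤ n) (_hi : 0 ≤ i) :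
    posF n i + dirF n i = posF n (i + 1) ∧
    (if posF n (i + 1) ≥ n * 2 then (-1 : Int)
     else if posF n (i + 1) < 0 then 1 else dirF n i) = dirF n (i + 1) := by
  unfold posF dirF
  rw [mod_pos_eq_emod i n hn, mod_pos_eq_emod (i+1) n hn, emod_succ i n hn]
  have h0 : 0 ≤ i % (4 * n + 2) := Int.emod_nonneg _ (by omega)
  have h1 : i % (4 * n + 2) < 4 * n + 2 := Int.emod_lt_of_pos _ (by omega)
  constructor
  · split_ifs <;> omega
  · split_ifs <;> omega

-- the appended note from the closed-form state is exactly B's note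
lemma note_eq (scale : List Int) (i : Int) :
    (PySem.List.pyGet? scale (PySem.Int.mod (posF (scale.length : Int) i) (scale.length : Int))).getD 0
      + (PySem.Int.floordiv (posF (scale.length : Int) i) (scale.length : Int)) * 12
      = waveNoteB scale i := by
  unfold waveNoteB posF
  rfl

-- loop invariant: folding A's step over range(i, b) from the closed-form state appends B's notes
lemma loop_inv (scale : List Int) (hn : 1 ≤ (scale.length : Int)) :
    ∀ (k : Nat) (i b : Int) (acc : List Int), 0 ≤ i → (b - i).toNat = k →
      ((PySem.List.pyRange i b 1).foldl (waveStepA scale)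
          (acc, dirF (scale.length : Int) i, posF (scale.length : Int) i)).1
        = acc ++ (PySem.List.pyRange i b 1).map (waveNoteB scale) := by
  intro k
  induction k with
  | zero =>
    intro i b acc hi hk
    rw [PySem.List.pyRange_one_eq_nil (by omega)]
    simp
  | succ k ih =>
    intro i b acc hi hk
    by_cases hib : i < b
    · rw [PySem.List.pyRange_one_cons hib]
      have hfst : waveStepA scale
            (acc, dirF (scale.length : Int) i, posF (scale.length : Int) i) i
          = (acc ++ [waveNoteB scale i], dirF (scale.length : Int) (i + 1),
             posF (scale.length : Int) (i + 1)) := by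
        obtain ⟨hpos, hdir⟩ := step_state (scale.length : Int) i hn hi
        unfold waveStepA
        simp only []
        rw [note_eq scale i, hpos, ← hdir]
        split_ifs <;> rfl
      rw [List.foldl_cons, hfst,
          ih (i + 1) b (acc ++ [waveNoteB scale i]) (by omega) (by omega)]
      simp
    · rw [PySem.List.pyRange_one_eq_nil (by omega)]
      simp

lemma dirF_zero (n : Int) (hn : 1 ≤ n) : dirF n 0 = 1 := by
  unfold dirF
  rw [mod_pos_eq_emod 0 n hn]
  have : (0:Int) % (4 * n + 2) = 0 := by simp
  rw [this]
  split_ifs <;> omega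

lemma posF_zero (n : Int) (hn : 1 ≤ n) : posF n 0 = 0 := by
  unfold posF
  rw [mod_pos_eq_emod 0 n hn]
  have : (0:Int) % (4 * n + 2) = 0 := by simp
  rw [this]
  split_ifs <;> omega

-- ===== VERDICT (by name: the statement is the Claim_ definition above) =====
theorem wave_melody_py_spec : Claim_equal_wave_melody_py := by
  intro scale length _hdom hpre
  unfold Spec_wave_melody_py wave_melody_py wave_melody_py_alt
  by_cases hlen : length ≤ 0
  · rw [PySem.List.pyRange_one_eq_nil (by omega)]
    simp
  · have hne : scale ≠ [] := by
      rcases hpre with h | h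
      · exact h
      · omega
    have hn : 1 ≤ (scale.length : Int) := by
      have := List.length_pos_iff.mpr hne
      omega
    have := loop_inv scale hn (length - 0).toNat 0 length [] (by omega) rfl
    rw [dirF_zero _ hn, posF_zero _ hn] at this
    simpa using this
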